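-- pv_equiv track=rewrite | github.com/kaydenna92/NO_PS_Solve_No_JOB | programmers/Lv1/모의고사.py | solution
-- ===== SOURCE A (Python) =====
-- def solution(answers):
--     answer = []
--     P1 = [1, 2, 3, 4, 5] # 5
--     P2 = [2, 1, 2, 3, 2, 4, 2, 5] # 8
--     P3 = [3, 3, 1, 1, 2, 2, 4, 4, 5, 5] # 10
--     scores = [0, 0, 0] # 1번, 2번, 3번 수포자의 정답 수 Count
--
--     for i in range(len(answers)):
--
--         if answers[i] == P1[i % 5]:
--             scores[0] += 1
--
--         if answers[i] == P2[i % 8]: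
--             scores[1] += 1
--
--         if answers[i] == P3[i % 10]:
--             scores[2] += 1
--
--     MAX = max(scores)
--     person = 0
--     for i in range(len(scores)):
--         if MAX == scores[i]:
--             answer.append(i + 1)
--
--     return answer
-- ===== SOURCE B (Python) =====
-- def _score(answers, pattern):
--     # one independent pass: cyclic zip of answers with the pattern
--     rem = []
--     s = 0
--     for a in answers:
--         if not rem:
--             rem = pattern
--         s += a == rem[0]
--         rem = rem[1:]
--     return s
--
--
-- def solution(answers):
--     s1 = _score(answers, [1, 2, 3, 4, 5])
--     s2 = _score(answers, [2, 1, 2, 3, 2, 4, 2, 5])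
--     s3 = _score(answers, [3, 3, 1, 1, 2, 2, 4, 4, 5, 5])
--     m = max(s1, s2, s3)
--     return [i + 1 for i, s in enumerate([s1, s2, s3]) if s == m]
-- ===== Notes on version B (the rewrite author's own statement) =====
-- stated objective: alternative
-- what changed: Replaces A's single interleaved scan with modular indexing (i%5/i%8/i%10 into three patterns inside one loop) by three independent cyclic-zip passes, one per student, each rotating a remainder copy of its pattern, and forms the result with an enumerate comprehension instead of an index loop.
import Mathlib
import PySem

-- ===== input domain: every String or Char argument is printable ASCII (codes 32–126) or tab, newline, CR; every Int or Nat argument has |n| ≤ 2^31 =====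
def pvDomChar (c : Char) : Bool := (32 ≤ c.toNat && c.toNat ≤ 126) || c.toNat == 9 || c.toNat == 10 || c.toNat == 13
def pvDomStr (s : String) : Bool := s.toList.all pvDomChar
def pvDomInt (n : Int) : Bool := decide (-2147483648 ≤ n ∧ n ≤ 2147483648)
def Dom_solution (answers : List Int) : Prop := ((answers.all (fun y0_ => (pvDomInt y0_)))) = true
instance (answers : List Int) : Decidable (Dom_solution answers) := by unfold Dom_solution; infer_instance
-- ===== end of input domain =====

-- B replaces A's single interleaved mod-indexed scan by three independent cyclic-zip passes
-- plus an enumerate comprehension: a different decomposition of the same O(n) task.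

-- ===== PORT A =====
-- the body of A's single loop, updating the three counters with i%5 / i%8 / i%10 lookups
def stepA (answers : List Int) (s : Int × Int × Int) (i : Int) : Int × Int × Int :=
  let a := PySem.List.pyGetD answers i 0
  let s0 := if a = PySem.List.pyGetD [1, 2, 3, 4, 5] (PySem.Int.mod i 5) 0 then s.1 + 1 else s.1
  let s1 := if a = PySem.List.pyGetD [2, 1, 2, 3, 2, 4, 2, 5] (PySem.Int.mod i 8) 0 then s.2.1 + 1 else s.2.1
  let s2 := if a = PySem.List.pyGetD [3, 3, 1, 1, 2, 2, 4, 4, 5, 5] (PySem.Int.mod i 10) 0 then s.2.2 + 1 else s.2.2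
  (s0, s1, s2)

def solution (answers : List Int) : List Int :=
  let scores := (PySem.List.pyRange 0 (answers.length : Int) 1).foldl (stepA answers) (0, 0, 0)
  let scoresL : List Int := [scores.1, scores.2.1, scores.2.2]
  let MAX := (PySem.List.max? scoresL (fun y => y)).getD 0
  (PySem.List.pyRange 0 3 1).foldl
    (fun ans i => if MAX = PySem.List.pyGetD scoresL i 0 then ans ++ [i + 1] else ans) []

-- ===== PORT B =====
-- _score in Source B: one independent pass over answers, rotating a remainder copy `rem` of the pattern
def cyc (P : List Int) : List Int → List Int → Int
  | _, [] => 0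
  | rem, a :: rest =>
    let r := if rem.isEmpty then P else rem
    (if a = r.headD 0 then 1 else 0) + cyc P r.tail rest

def solution_alt (answers : List Int) : List Int :=
  let s1 := cyc [1, 2, 3, 4, 5] [] answers
  let s2 := cyc [2, 1, 2, 3, 2, 4, 2, 5] [] answers
  let s3 := cyc [3, 3, 1, 1, 2, 2, 4, 4, 5, 5] [] answers
  let m := max s1 (max s2 s3)
  (PySem.List.enumerate [s1, s2, s3] 0).filterMap
    (fun p => if p.2 = m then some (p.1 + 1) else none)

-- ===== PRECONDITION & SPEC =====
def Spec_solution (answers : List Int) (out : List Int) : Prop := out = solution_alt answers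
instance (answers : List Int) (out : List Int) : Decidable (Spec_solution answers out) := by unfold Spec_solution; infer_instance

-- ===== CLAIM (what is proved, stated in full; the proofs are below) =====
def Claim_equal_solution : Prop := ∀ (answers : List Int), Dom_solution answers → Spec_solution answers (solution answers)

-- ===== LEMMAS AND PROOFS =====

-- reference count: matches of l against P read with modular indexing starting at position j
def cnt (P : List Int) : Nat → List Int → Int
  | _, [] => 0
  | j, a :: rest => (if a = P.getD (j % P.length) 0 then 1 else 0) + cnt P (j + 1) rest

-- B's rotating-remainder pass computes the modular-indexed count
lemma cyc_eq_cnt (P : List Int) (hP : P ≠ []) :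
    ∀ (l : List Int) (j : Nat) (rem : List Int),
      (rem = P.drop (j % P.length) ∨ (rem = [] ∧ j % P.length = 0)) →
      cyc P rem l = cnt P j l := by
  intro l
  induction l with
  | nil => intro j rem _; simp [cyc, cnt]
  | cons a rest ih =>
    intro j rem hrem
    have hlen : 0 < P.length := List.length_pos_iff.mpr hP
    have hj : j % P.length < P.length := Nat.mod_lt _ hlen
    have hdne : P.drop (j % P.length) ≠ [] := by
      intro hc
      have := List.drop_eq_nil_iff.mp hc
      omega
    -- in both cases the effective rotation equals the drop at j % |P|
    have hr : (if rem.isEmpty then P else rem) = P.drop (j % P.length) := by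
      rcases hrem with h | ⟨h1, h2⟩
      · rw [h, if_neg]
        simp [List.isEmpty_iff, hdne]
      · simp [h1, h2]
    obtain ⟨x, xs, he⟩ := List.exists_cons_of_ne_nil hdne
    have hd : P.getD (j % P.length) 0 = x := by
      have h2 : P[j % P.length]? = some x := by rw [← List.head?_drop, he]; rfl
      simp [List.getD_eq_getElem?_getD, h2]
    have hxs : xs = P.drop (j % P.length + 1) := by
      rw [← List.tail_drop, he]; rfl
    have hmod : (j + 1) % P.length = (j % P.length + 1) % P.length := by
      conv_lhs => rw [← Nat.mod_add_mod]
    have hnext : xs = P.drop ((j + 1) % P.length)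
        ∨ (xs = [] ∧ (j + 1) % P.length = 0) := by
      by_cases hlast : j % P.length + 1 = P.length
      · right
        constructor
        · rw [hxs, hlast, List.drop_length]
        · rw [hmod, hlast, Nat.mod_self]
      · left
        rw [hmod, Nat.mod_eq_of_lt (by omega), ← hxs]
    show (if a = (if rem.isEmpty then P else rem).headD 0 then 1 else 0)
        + cyc P (if rem.isEmpty then P else rem).tail rest = cnt P j (a :: rest)
    rw [hr, he, cnt, hd]
    simp only [List.headD_cons, List.tail_cons]
    rw [ih (j + 1) _ hnext]
    rfl

-- A's single interleaved loop computes the three modular-indexed counts at once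
lemma foldA (ans : List Int) :
    ∀ (l : List Int) (k : Nat) (acc : Int × Int × Int), ans.drop k = l →
      (PySem.List.pyRange (k : Int) (ans.length : Int) 1).foldl (stepA ans) acc
        = (acc.1 + cnt [1, 2, 3, 4, 5] k l,
           acc.2.1 + cnt [2, 1, 2, 3, 2, 4, 2, 5] k l,
           acc.2.2 + cnt [3, 3, 1, 1, 2, 2, 4, 4, 5, 5] k l) := by
  intro l
  induction l with
  | nil =>
    intro k acc hdrop
    have hk : ans.length ≤ k := List.drop_eq_nil_iff.mp hdrop
    rw [PySem.List.pyRange_one_eq_nil (by exact_mod_cast hk)]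
    simp [cnt]
  | cons a rest ih =>
    intro k acc hdrop
    have hk : k < ans.length := by
      by_contra hc
      rw [List.drop_eq_nil_iff.mpr (by omega)] at hdrop
      exact absurd hdrop.symm (List.cons_ne_nil a rest)
    have ha : ans.getD k 0 = a := by
      have h2 : ans[k]? = some a := by rw [← List.head?_drop, hdrop]; rfl
      simp [List.getD_eq_getElem?_getD, h2]
    have hrest : ans.drop (k + 1) = rest := by
      rw [← List.tail_drop, hdrop]; rfl
    have hcast : ((k : Int) + 1) = ((k + 1 : Nat) : Int) := by push_cast; ring
    rw [PySem.List.pyRange_one_cons (by exact_mod_cast hk), List.foldl_cons, hcast,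
      ih (k + 1) _ hrest]
    have m5 : PySem.Int.mod (k : Int) 5 = ((k % 5 : Nat) : Int) := by
      exact_mod_cast PySem.Int.mod_natCast k 5
    have m8 : PySem.Int.mod (k : Int) 8 = ((k % 8 : Nat) : Int) := by
      exact_mod_cast PySem.Int.mod_natCast k 8
    have m10 : PySem.Int.mod (k : Int) 10 = ((k % 10 : Nat) : Int) := by
      exact_mod_cast PySem.Int.mod_natCast k 10
    show _ = (acc.1 + cnt [1, 2, 3, 4, 5] k (a :: rest),
        acc.2.1 + cnt [2, 1, 2, 3, 2, 4, 2, 5] k (a :: rest),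
        acc.2.2 + cnt [3, 3, 1, 1, 2, 2, 4, 4, 5, 5] k (a :: rest))
    simp only [stepA, cnt, m5, m8, m10, PySem.List.pyGetD_natCast, ha, List.length_cons,
      List.length_nil, Prod.mk.injEq]
    norm_num
    refine ⟨?_, ?_, ?_⟩ <;> split_ifs <;> ring

-- A's max-then-index-loop output equals B's enumerate comprehension, for any three scores
lemma finals (a b c : Int) :
    (PySem.List.pyRange 0 3 1).foldl
      (fun ans i => if (PySem.List.max? [a, b, c] (fun y => y)).getD 0
          = PySem.List.pyGetD [a, b, c] i 0 then ans ++ [i + 1] else ans) []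
    = (PySem.List.enumerate [a, b, c] 0).filterMap
        (fun p => if p.2 = max a (max b c) then some (p.1 + 1) else none) := by
  have hr : PySem.List.pyRange 0 3 1 = [0, 1, 2] := by decide
  rw [hr]
  have hm : (PySem.List.max? [a, b, c] (fun y => y)).getD 0 = max a (max b c) := by
    simp [PySem.List.max?_id_cons, max_assoc]
  have g0 : PySem.List.pyGetD [a, b, c] 0 0 = a := rfl
  have g1 : PySem.List.pyGetD [a, b, c] 1 0 = b := rfl
  have g2 : PySem.List.pyGetD [a, b, c] 2 0 = c := rfl
  simp only [List.foldl, hm, g0, g1, g2, PySem.List.enumerate_cons, PySem.List.enumerate_nil,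
    List.filterMap]
  set m := max a (max b c)
  by_cases h1 : a = m <;> by_cases h2 : b = m <;> by_cases h3 : c = m <;>
    simp [h1, h2, h3, eq_comm]

-- ===== VERDICT (by name: the statement is the Claim_ definition above) =====
theorem solution_spec : Claim_equal_solution := by
  intro ans _
  unfold Spec_solution solution solution_alt
  have h := foldA ans ans 0 (0, 0, 0) (by simp)
  simp only [Nat.cast_zero] at h
  rw [h]
  have c1 := cyc_eq_cnt [1,2,3,4,5] (by simp) ans 0 [] (Or.inr ⟨rfl, by simp⟩)
  have c2 := cyc_eq_cnt [2,1,2,3,2,4,2,5] (by simp) ans 0 [] (Or.inr ⟨rfl, by simp⟩)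
  have c3 := cyc_eq_cnt [3,3,1,1,2,2,4,4,5,5] (by simp) ans 0 [] (Or.inr ⟨rfl, by simp⟩)
  rw [c1, c2, c3]
  simpa using finals (cnt [1,2,3,4,5] 0 ans) (cnt [2,1,2,3,2,4,2,5] 0 ans) (cnt [3,3,1,1,2,2,4,4,5,5] 0 ans)
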